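-- pv_equiv track=rewrite | github.com/sarannetworkprogammer/DS_ALGO | Practise/subarrays/good_subarray.py | all_subarrays
-- ===== SOURCE A (Python) =====
-- count_good =0
--
-- A = [3,16,16,15,9,16,2,7,6,17,3,9]
--
-- B = 65
--
-- def sum_subarray(start, end,A):
--     sum_sub = 0
--     for i in range(start, end+1):
--         sum_sub = sum_sub + A[i]
--     return sum_sub
--
-- def all_subarrays(A,count_good):
--     n = len(A)
--
--     for i in range(0,n):
--         for j in range(i,n):
--             sum_sub = sum_subarray(i,j,A)
--             if (((j-i+1)%2 == 0))and (sum_sub < B):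
--                 count_good = count_good + 1
--             elif (((j-i+1)%2 == 1)) and (sum_sub > B):
--                 count_good = count_good + 1
--             else:
--                 pass
--     return count_good
-- ===== SOURCE B (Python) =====
-- def all_subarrays(A, count_good):
--     # running sum while extending j: O(n^2) instead of A's O(n^3)
--     n = len(A)
--     for i in range(0, n):
--         s = 0
--         for j in range(i, n):
--             s = s + A[j]
--             if (j - i + 1) % 2 == 0:
--                 if s < 65:
--                     count_good = count_good + 1
--             else:
--                 if s > 65:
--                     count_good = count_good + 1
--     return count_good
-- ===== Notes on version B (the rewrite author's own statement) =====
-- stated objective: faster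
-- what changed: B keeps a running sum while extending the right end j, removing A's inner sum_subarray rescan of each subarray.
import Mathlib
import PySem

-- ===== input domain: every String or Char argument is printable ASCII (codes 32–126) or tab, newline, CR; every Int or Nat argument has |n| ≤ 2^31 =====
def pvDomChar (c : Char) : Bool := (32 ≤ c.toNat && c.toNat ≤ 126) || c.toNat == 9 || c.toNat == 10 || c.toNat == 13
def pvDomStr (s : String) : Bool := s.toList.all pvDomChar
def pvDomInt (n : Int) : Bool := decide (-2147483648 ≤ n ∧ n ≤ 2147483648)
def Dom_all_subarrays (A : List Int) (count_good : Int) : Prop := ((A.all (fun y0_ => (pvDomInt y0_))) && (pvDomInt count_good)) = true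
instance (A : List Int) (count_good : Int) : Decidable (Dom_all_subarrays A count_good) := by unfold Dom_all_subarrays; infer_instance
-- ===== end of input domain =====

-- B replaces A's per-subarray rescan with a running sum while extending j (faster in a timing run).

-- ===== PORT A =====
-- A's helper sum_subarray(start, end, A); within all_subarrays the indices are
-- always in range, so pyGetD with default 0 is exact there.
def sum_subarray (start fin : Int) (A : List Int) : Int :=
  (PySem.List.pyRange start (fin + 1) 1).foldl (fun s i => s + PySem.List.pyGetD A i 0) 0

def all_subarrays (A : List Int) (count_good : Int) : Int :=
  let n : Int := A.length
  (PySem.List.pyRange 0 n 1).foldl (fun cg i =>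
    (PySem.List.pyRange i n 1).foldl (fun cg j =>
      let sum_sub := sum_subarray i j A
      if PySem.Int.mod (j - i + 1) 2 = 0 ∧ sum_sub < 65 then cg + 1
      else if PySem.Int.mod (j - i + 1) 2 = 1 ∧ sum_sub > 65 then cg + 1
      else cg) cg) count_good

-- ===== PORT B =====
def all_subarrays_alt (A : List Int) (count_good : Int) : Int :=
  let n : Int := A.length
  (PySem.List.pyRange 0 n 1).foldl (fun cg i =>
    ((PySem.List.pyRange i n 1).foldl (fun p j =>
      let s := p.2 + PySem.List.pyGetD A j 0
      let c := if PySem.Int.mod (j - i + 1) 2 = 0 then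
                 (if s < 65 then p.1 + 1 else p.1)
               else (if s > 65 then p.1 + 1 else p.1)
      (c, s)) (cg, 0)).1) count_good

-- ===== PRECONDITION & SPEC =====
def Spec_all_subarrays (A : List Int) (count_good : Int) (out : Int) : Prop := out = all_subarrays_alt A count_good
instance (A : List Int) (count_good : Int) (out : Int) : Decidable (Spec_all_subarrays A count_good out) := by unfold Spec_all_subarrays; infer_instance

-- ===== CLAIM (what is proved, stated in full; the proofs are below) =====
def Claim_equal_all_subarrays : Prop := ∀ (A : List Int) (count_good : Int), Dom_all_subarrays A count_good → Spec_all_subarrays A count_good (all_subarrays A count_good)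

-- ===== LEMMAS AND PROOFS =====

-- extending the subarray one step on the right adds A[j] to its sum
lemma sum_subarray_step (A : List Int) (i j : Int) (h : i ≤ j) :
    sum_subarray i j A = sum_subarray i (j - 1) A + PySem.List.pyGetD A j 0 := by
  unfold sum_subarray
  rw [show j - 1 + 1 = j by ring, PySem.List.pyRange_one_succ_right h, List.foldl_append]
  simp

lemma sum_subarray_empty (A : List Int) (i : Int) :
    sum_subarray i (i - 1) A = 0 := by
  unfold sum_subarray
  rw [show i - 1 + 1 = i by ring, PySem.List.pyRange_one_eq_nil le_rfl]
  rfl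

-- B's inner fold carries (count, running sum); with the invariant s = sum of A[i..j-1]
-- its count component equals A's inner fold
lemma inner_eq (A : List Int) (i : Int) :
    ∀ (k : Nat) (j cg s : Int), i ≤ j → ((A.length : Int) - j).toNat = k →
    s = sum_subarray i (j - 1) A →
    ((PySem.List.pyRange j (A.length : Int) 1).foldl (fun p j =>
      let s := p.2 + PySem.List.pyGetD A j 0
      let c := if PySem.Int.mod (j - i + 1) 2 = 0 then
                 (if s < 65 then p.1 + 1 else p.1)
               else (if s > 65 then p.1 + 1 else p.1)
      (c, s)) (cg, s)).1
    = (PySem.List.pyRange j (A.length : Int) 1).foldl (fun cg j =>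
      let sum_sub := sum_subarray i j A
      if PySem.Int.mod (j - i + 1) 2 = 0 ∧ sum_sub < 65 then cg + 1
      else if PySem.Int.mod (j - i + 1) 2 = 1 ∧ sum_sub > 65 then cg + 1
      else cg) cg := by
  intro k
  induction k with
  | zero =>
      intro j cg s hij hk hs
      rw [PySem.List.pyRange_one_eq_nil (by omega)]; rfl
  | succ k ih =>
      intro j cg s hij hk hs
      by_cases hjb : j < (A.length : Int)
      · rw [PySem.List.pyRange_one_cons hjb]
        simp only [List.foldl_cons]
        have hs' : s + PySem.List.pyGetD A j 0 = sum_subarray i j A := by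
          rw [sum_subarray_step A i j hij, hs]
        have hmod : PySem.Int.mod (j - i + 1) 2 = 0 ∨ PySem.Int.mod (j - i + 1) 2 = 1 := by
          have h1 := PySem.Int.mod_nonneg (j - i + 1) (b := 2) (by omega)
          have h2 := PySem.Int.mod_lt (j - i + 1) (b := 2) (by omega)
          omega
        have hcg : (if PySem.Int.mod (j - i + 1) 2 = 0 then
                 (if s + PySem.List.pyGetD A j 0 < 65 then cg + 1 else cg)
               else (if s + PySem.List.pyGetD A j 0 > 65 then cg + 1 else cg))
            = (if PySem.Int.mod (j - i + 1) 2 = 0 ∧ sum_subarray i j A < 65 then cg + 1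
               else if PySem.Int.mod (j - i + 1) 2 = 1 ∧ sum_subarray i j A > 65 then cg + 1
               else cg) := by
          rw [hs']
          generalize sum_subarray i j A = S
          rcases hmod with h | h <;> split_ifs <;> omega
        simp only [hcg]
        exact ih (j + 1) _ _ (by omega) (by omega)
          (by rw [show j + 1 - 1 = j by ring]; exact hs')
      · rw [PySem.List.pyRange_one_eq_nil (by omega)]; rfl

-- ===== VERDICT (by name: the statement is the Claim_ definition above) =====
theorem all_subarrays_spec : Claim_equal_all_subarrays := by
  intro A count_good _
  unfold Spec_all_subarrays all_subarrays all_subarrays_alt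
  refine PySem.List.foldl_congr_mem _ _ _ _ ?_
  intro cg i _
  exact (inner_eq A i (((A.length : Int) - i)).toNat i cg 0 le_rfl rfl
    (sum_subarray_empty A i).symm).symm
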